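-- pv_equiv track=rewrite | github.com/Umi7899/langchain-ChatGLM-My | lottery_predicter_pl_end.py | complete_combination
-- ===== SOURCE A (Python) =====
-- def complete_combination(combination):
--     unique_combination = sorted(list(set(combination)))  # 去重并排序
--     max_value = max(unique_combination)  # 最大值
--
--     while len(unique_combination) < 7:  # 直到组合长度为7
--         max_value = (max_value + 1) % 10  # 下一个补充的数字
--         if max_value not in unique_combination:  # 确保补充的数字不重复
--             unique_combination.append(max_value)
--             unique_combination = sorted(unique_combination)  # 重新排序
--
--     return unique_combination
-- ===== SOURCE B (Python) =====
-- def complete_combination(combination):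
--     unique = sorted(set(combination))
--     start = (max(unique) + 1) % 10
--     need = 7 - len(unique)
--     hi = [d for d in range(start, 10) if d not in unique]
--     lo = [d for d in range(start) if d not in unique]
--     if need <= 0:
--         extras = []
--     elif need <= len(hi):
--         extras = hi[:need]
--     else:
--         extras = hi + lo[:need - len(hi)]
--     return sorted(unique + extras)
-- ===== Notes on version B (the rewrite author's own statement) =====
-- stated objective: alternative
-- what changed: Replaces A's cyclic increment/test/append/re-sort while-loop with a partition-and-count selection: split the missing digits into the block at-or-after the wrap point and the block before it, take the needed count from the first block and the remainder from the second by arithmetic on lengths, and sort once at the end.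
import Mathlib
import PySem

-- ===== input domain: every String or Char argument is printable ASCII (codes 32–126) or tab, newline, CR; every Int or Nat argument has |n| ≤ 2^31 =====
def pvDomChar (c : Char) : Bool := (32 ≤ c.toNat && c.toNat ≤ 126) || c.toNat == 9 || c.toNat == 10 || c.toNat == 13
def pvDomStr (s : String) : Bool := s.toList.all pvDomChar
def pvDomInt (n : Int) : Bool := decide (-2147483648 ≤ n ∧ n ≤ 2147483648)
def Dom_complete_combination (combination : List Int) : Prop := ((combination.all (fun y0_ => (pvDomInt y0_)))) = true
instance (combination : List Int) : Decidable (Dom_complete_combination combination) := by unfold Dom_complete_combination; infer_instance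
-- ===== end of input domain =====

-- B replaces A's cyclic increment/test/append/re-sort while-loop with a partition-and-count
-- selection over the two blocks of missing digits around the wrap point (objective: alternative).

-- ===== PORT A =====
-- the while-loop of A; fuel makes the recursion total (100 is far more than the loop ever needs)
def ccLoop : Nat → List Int → Int → List Int
  | 0, u, _ => u
  | f + 1, u, m =>
    if u.length < 7 then
      if PySem.Int.mod (m + 1) 10 ∉ u then
        ccLoop f (PySem.List.sorted (u ++ [PySem.Int.mod (m + 1) 10]) (fun x => x) false)
          (PySem.Int.mod (m + 1) 10)
      else ccLoop f u (PySem.Int.mod (m + 1) 10)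
    else u

def complete_combination (combination : List Int) : List Int :=
  match PySem.List.max?
      (PySem.List.sorted (PySem.Set.ofList combination) (fun x => x) false) (fun x => x) with
  | none => []   -- max([]) raises ValueError: excluded by Pre_
  | some m => ccLoop 100 (PySem.List.sorted (PySem.Set.ofList combination) (fun x => x) false) m

-- ===== PORT B =====
-- the if/elif/else of Source B choosing extras from hi = missing digits in [start,10),
-- lo = missing digits in [0,start); Python's hi[:k]/lo[:k] with k ≥ 0 is List.take k.toNat (exact)
def ccExtras (u : List Int) (start : Int) : List Int :=
  if (7 : Int) - (u.length : Int) ≤ 0 then []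
  else if (7 : Int) - (u.length : Int) ≤
      ((((PySem.List.pyRange start 10 1).filter (fun d => decide (d ∉ u))).length : Int)) then
    ((PySem.List.pyRange start 10 1).filter (fun d => decide (d ∉ u))).take
      (((7 : Int) - (u.length : Int)).toNat)
  else
    ((PySem.List.pyRange start 10 1).filter (fun d => decide (d ∉ u))) ++
      ((PySem.List.pyRange 0 start 1).filter (fun d => decide (d ∉ u))).take
        ((((7 : Int) - (u.length : Int)) -
          ((((PySem.List.pyRange start 10 1).filter (fun d => decide (d ∉ u))).length : Int))).toNat)

def complete_combination_alt (combination : List Int) : List Int :=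
  match PySem.List.max?
      (PySem.List.sorted (PySem.Set.ofList combination) (fun x => x) false) (fun x => x) with
  | none => []   -- max([]) raises ValueError: excluded by Pre_
  | some mv =>
    PySem.List.sorted
      (PySem.List.sorted (PySem.Set.ofList combination) (fun x => x) false ++
        ccExtras (PySem.List.sorted (PySem.Set.ofList combination) (fun x => x) false)
          (PySem.Int.mod (mv + 1) 10))
      (fun x => x) false

-- ===== PRECONDITION & SPEC =====
-- Pre_ excludes only the empty list, on which Python's max of an empty collection raises ValueError (B raises there too).
def Pre_complete_combination (combination : List Int) : Prop := combination ≠ []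
instance (combination : List Int) : Decidable (Pre_complete_combination combination) := by
  unfold Pre_complete_combination; infer_instance
def pvWitness_complete_combination : List Int := [1, 2, 3]

def Spec_complete_combination (combination : List Int) (out : List Int) : Prop :=
  out = complete_combination_alt combination
instance (combination : List Int) (out : List Int) : Decidable (Spec_complete_combination combination out) := by
  unfold Spec_complete_combination; infer_instance

-- ===== CLAIM (what is proved, stated in full; the proofs are below) =====
def Claim_equal_complete_combination : Prop :=
  ∀ (combination : List Int), Dom_complete_combination combination →
    Pre_complete_combination combination →
    Spec_complete_combination combination (complete_combination combination)

-- ===== LEMMAS AND PROOFS =====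

-- the loop re-expressed over an explicit list of candidate digits
def ccLoopC : List Int → List Int → List Int
  | [], u => u
  | d :: c, u =>
    if u.length < 7 then
      if d ∉ u then ccLoopC c (PySem.List.sorted (u ++ [d]) (fun x => x) false)
      else ccLoopC c u
    else u

-- the sequence of candidate digits the loop's counter runs through
def candSeq : Nat → Int → List Int
  | 0, _ => []
  | f + 1, m => PySem.Int.mod (m + 1) 10 :: candSeq f (PySem.Int.mod (m + 1) 10)

theorem candSeq_congr (f : Nat) (x y : Int) (h : x % 10 = y % 10) :
    candSeq f x = candSeq f y := by
  induction f generalizing x y with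
  | zero => rfl
  | succ f ih =>
    have hm : PySem.Int.mod (x + 1) 10 = PySem.Int.mod (y + 1) 10 := by
      simp only [PySem.Int.mod_eq_emod_of_pos (show (0:Int) < 10 by norm_num)]
      omega
    show PySem.Int.mod (x + 1) 10 :: candSeq f (PySem.Int.mod (x + 1) 10)
       = PySem.Int.mod (y + 1) 10 :: candSeq f (PySem.Int.mod (y + 1) 10)
    rw [hm]

theorem candSeq_succ (f : Nat) (m : Int) :
    candSeq (f + 1) m = PySem.Int.mod (m + 1) 10 :: candSeq f (m + 1) := by
  have h : candSeq f (PySem.Int.mod (m + 1) 10) = candSeq f (m + 1) :=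
    candSeq_congr f _ _ (by
      simp only [PySem.Int.mod_eq_emod_of_pos (show (0:Int) < 10 by norm_num)]
      omega)
  show PySem.Int.mod (m + 1) 10 :: candSeq f (PySem.Int.mod (m + 1) 10) = _
  rw [h]

theorem candSeq_eq_map (f : Nat) (m : Int) :
    candSeq f m = (List.range f).map (fun k : Nat => PySem.Int.mod (m + 1 + (k : Int)) 10) := by
  induction f generalizing m with
  | zero => rfl
  | succ f ih =>
    rw [candSeq_succ, ih, List.range_succ_eq_map]
    simp only [List.map_cons, List.map_map, Nat.cast_zero, add_zero]
    congr 1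
    apply List.map_congr_left
    intro k _
    simp only [Function.comp_apply]
    congr 1
    push_cast
    ring

theorem candSeq_add (a b : Nat) (m : Int) :
    candSeq (a + b) m = candSeq a m ++ candSeq b (m + (a : Int)) := by
  induction a generalizing m with
  | zero =>
    simp only [Nat.zero_add, Nat.cast_zero, add_zero]
    rfl
  | succ a ih =>
    have h1 : a + 1 + b = (a + b) + 1 := by omega
    rw [h1, candSeq_succ, candSeq_succ, ih]
    simp only [List.cons_append]
    congr 2
    apply candSeq_congr
    push_cast
    omega

theorem bridge (f : Nat) (u : List Int) (m : Int) :
    ccLoop f u m = ccLoopC (candSeq f m) u := by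
  induction f generalizing u m with
  | zero => rfl
  | succ f ih =>
    have hcs : candSeq f (PySem.Int.mod (m + 1) 10) = candSeq f (m + 1) :=
      candSeq_congr f _ _ (by
        simp only [PySem.Int.mod_eq_emod_of_pos (show (0:Int) < 10 by norm_num)]
        omega)
    rw [candSeq_succ]
    show (if u.length < 7 then
        if PySem.Int.mod (m + 1) 10 ∉ u then
          ccLoop f (PySem.List.sorted (u ++ [PySem.Int.mod (m + 1) 10]) (fun x => x) false)
            (PySem.Int.mod (m + 1) 10)
        else ccLoop f u (PySem.Int.mod (m + 1) 10)
      else u) =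
      (if u.length < 7 then
        if PySem.Int.mod (m + 1) 10 ∉ u then
          ccLoopC (candSeq f (m + 1))
            (PySem.List.sorted (u ++ [PySem.Int.mod (m + 1) 10]) (fun x => x) false)
        else ccLoopC (candSeq f (m + 1)) u
      else u)
    by_cases h7 : u.length < 7
    · by_cases hd : PySem.Int.mod (m + 1) 10 ∉ u
      · simp only [h7, hd, if_true, ih, hcs]
      · simp only [h7, hd, if_true, if_false, ih, hcs]
    · simp [h7]

theorem ccLoopC_of_ge (c u : List Int) (h : ¬ u.length < 7) : ccLoopC c u = u := by
  cases c with
  | nil => rfl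
  | cons d c => simp [ccLoopC, h]

theorem ccLoopC_append (c₁ c₂ u : List Int) :
    ccLoopC (c₁ ++ c₂) u = ccLoopC c₂ (ccLoopC c₁ u) := by
  induction c₁ generalizing u with
  | nil => rfl
  | cons d c ih =>
    simp only [List.cons_append, ccLoopC]
    by_cases h7 : u.length < 7
    · by_cases hd : d ∉ u <;> simp [h7, hd, ih]
    · simp [h7, ccLoopC_of_ge _ _ h7]

theorem sorted_id_eq_self (u : List Int) (h : u.Pairwise (· < ·)) :
    PySem.List.sorted u (fun x => x) false = u :=
  PySem.List.sorted_eq_of_perm_of_pairwise_lt u u (fun x => x) (List.Perm.refl u) h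

-- the key characterisation: the loop over candidates c equals "filter, take, sort once"
theorem ccLoopC_spec (c u : List Int) (hc : c.Nodup) (hu : u.Pairwise (· < ·))
    (hav : u.length < 7 → 7 - u.length ≤ (c.filter (fun d => decide (d ∉ u))).length) :
    ccLoopC c u =
      PySem.List.sorted
        (u ++ (c.filter (fun d => decide (d ∉ u))).take (7 - u.length)) (fun x => x) false := by
  induction c generalizing u with
  | nil =>
    simp only [ccLoopC, List.filter_nil, List.take_nil, List.append_nil]
    exact (sorted_id_eq_self u hu).symm
  | cons d c ih =>
    by_cases h7 : u.length < 7
    · by_cases hd : d ∈ u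
      · have hfd : (List.filter (fun x => decide (x ∉ u)) (d :: c)) =
            List.filter (fun x => decide (x ∉ u)) c := by
          simp [hd]
        simp only [ccLoopC, h7, if_true, hd, not_true_eq_false, if_false]
        rw [ih u hc.of_cons hu (fun _ => by have := hav h7; rw [hfd] at this; exact this), hfd]
      · -- d is appended; u' = sorted(u ++ [d])
        have hperm : (PySem.List.sorted (u ++ [d]) (fun x => x) false).Perm (u ++ [d]) :=
          PySem.List.sorted_perm _ _ _
        set u' := PySem.List.sorted (u ++ [d]) (fun x => x) false with hu'def
        have hnd_u : u.Nodup := hu.imp (fun h => ne_of_lt h)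
        have hnd_ud : (u ++ [d]).Nodup :=
          List.Nodup.append hnd_u (List.nodup_singleton d) (List.disjoint_singleton.mpr hd)
        have hnd' : u'.Nodup := hperm.nodup_iff.mpr hnd_ud
        have hu'lt : u'.Pairwise (· < ·) := by
          have hle : u'.Pairwise (· ≤ ·) := PySem.List.sorted_pairwise _ _
          exact (hle.and hnd').imp (fun ⟨h1, h2⟩ => lt_of_le_of_ne h1 h2)
        have hlen' : u'.length = u.length + 1 := by
          simpa using hperm.length_eq
        have hmem' : ∀ x, x ∈ u' ↔ x ∈ u ∨ x = d := by
          intro x; rw [hperm.mem_iff]; simp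
        have hdc : d ∉ c := (List.nodup_cons.mp hc).1
        have hfilter : List.filter (fun x => decide (x ∉ u')) c =
            List.filter (fun x => decide (x ∉ u)) c := by
          apply List.filter_congr
          intro x hx
          have hxd : x ≠ d := fun h => hdc (h ▸ hx)
          simp [hmem', hxd]
        have hfd : List.filter (fun x => decide (x ∉ u)) (d :: c) =
            d :: List.filter (fun x => decide (x ∉ u)) c := by
          simp [hd]
        have hav' : u'.length < 7 → 7 - u'.length ≤
            (c.filter (fun x => decide (x ∉ u'))).length := by
          intro _
          have h1 := hav h7
          rw [hfd] at h1
          rw [hfilter, hlen']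
          simp only [List.length_cons] at h1
          omega
        simp only [ccLoopC, h7, if_true, hd, not_false_iff, if_true]
        rw [ih u' hc.of_cons hu'lt hav', hfd, hfilter, hlen']
        obtain ⟨k, hk⟩ : ∃ k, 7 - u.length = k + 1 := ⟨7 - u.length - 1, by omega⟩
        rw [hk, List.take_succ_cons]
        have h2 : 7 - (u.length + 1) = k := by omega
        rw [h2]
        apply PySem.List.sorted_eq_sorted_of_perm _ _ _ (fun a b h => h)
        have heq : (u ++ [d]) ++ (List.filter (fun x => decide (x ∉ u)) c).take k
            = u ++ d :: (List.filter (fun x => decide (x ∉ u)) c).take k := by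
          simp
        exact heq ▸ hperm.append_right _
    · simp only [Nat.sub_eq_zero_of_le (by omega : 7 ≤ u.length), List.take_zero,
        List.append_nil]
      rw [ccLoopC_of_ge _ _ h7]
      exact (sorted_id_eq_self u hu).symm

theorem candSeq10_nodup (m : Int) : (candSeq 10 m).Nodup := by
  rw [candSeq_eq_map]
  apply List.Nodup.map_on _ List.nodup_range
  intro i hi j hj hij
  simp only [List.mem_range] at hi hj
  simp only [PySem.Int.mod_eq_emod_of_pos (show (0:Int) < 10 by norm_num)] at hij
  omega

theorem candSeq10_length (m : Int) : (candSeq 10 m).length = 10 := by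
  rw [candSeq_eq_map]; simp

theorem filter_card (u : List Int) (m : Int) (_hu : u.Pairwise (· < ·)) (h7 : u.length < 7) :
    7 - u.length ≤ ((candSeq 10 m).filter (fun d => decide (d ∉ u))).length := by
  have hnd := candSeq10_nodup m
  have hlen := candSeq10_length m
  set c := candSeq 10 m
  have hsplit := List.length_eq_length_filter_add (l := c) (fun d => decide (d ∉ u))
  have heq : c.filter (fun d => !decide (d ∉ u)) = c.filter (fun d => decide (d ∈ u)) := by
    apply List.filter_congr; intro x _; simp
  rw [heq] at hsplit
  have hmemle : (c.filter (fun d => decide (d ∈ u))).length ≤ u.length := by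
    have hndf : (c.filter (fun d => decide (d ∈ u))).Nodup := hnd.filter _
    have hsub : (c.filter (fun d => decide (d ∈ u))) ⊆ u := by
      intro x hx
      simpa using List.of_mem_filter hx
    exact (List.Nodup.subperm hndf hsub).length_le
  omega

-- A's loop visits the 10 digits as wrap-point block [start,10) followed by [0,start)
theorem candSeq_split (m : Int) :
    candSeq 10 m =
      PySem.List.pyRange (PySem.Int.mod (m + 1) 10) 10 1 ++
        PySem.List.pyRange 0 (PySem.Int.mod (m + 1) 10) 1 := by
  have hmod : PySem.Int.mod (m + 1) 10 = (m + 1) % 10 :=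
    PySem.Int.mod_eq_emod_of_pos (show (0:Int) < 10 by norm_num)
  have hcongr : candSeq 10 m = candSeq 10 ((m + 1) % 10 - 1) := by
    apply candSeq_congr; omega
  rw [hmod, hcongr]
  have hs1 : 0 ≤ (m + 1) % 10 := Int.emod_nonneg _ (by norm_num)
  have hs2 : (m + 1) % 10 < 10 := Int.emod_lt_of_pos _ (by norm_num)
  set s := (m + 1) % 10 with hsdef
  clear_value s
  interval_cases s <;> decide

-- fill_eq: A's whole loop equals "filter the cyclic candidates, take, sort once"
theorem fill_eq (u : List Int) (m : Int) (hu : u.Pairwise (· < ·)) :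
    ccLoop 100 u m =
      PySem.List.sorted
        (u ++ ((candSeq 10 m).filter (fun d => decide (d ∉ u))).take (7 - u.length))
        (fun x => x) false := by
  rw [bridge, (by norm_num : (100 : Nat) = 10 + 90), candSeq_add, ccLoopC_append,
    ccLoopC_spec (candSeq 10 m) u (candSeq10_nodup m) hu (filter_card u m hu)]
  have hrlen : ¬ (PySem.List.sorted
      (u ++ ((candSeq 10 m).filter (fun d => decide (d ∉ u))).take (7 - u.length))
      (fun x => x) false).length < 7 := by
    rw [PySem.List.length_sorted, List.length_append, List.length_take]
    by_cases h7 : u.length < 7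
    · have := filter_card u m hu h7
      omega
    · omega
  rw [ccLoopC_of_ge _ _ hrlen]

-- B's partition-and-count selection produces exactly A's "take of the filtered cyclic list"
theorem extras_eq (u : List Int) (m : Int) :
    ((candSeq 10 m).filter (fun d => decide (d ∉ u))).take (7 - u.length) =
      ccExtras u (PySem.Int.mod (m + 1) 10) := by
  rw [candSeq_split, List.filter_append]
  unfold ccExtras
  set hi := (PySem.List.pyRange (PySem.Int.mod (m + 1) 10) 10 1).filter (fun d => decide (d ∉ u))
  set lo := (PySem.List.pyRange 0 (PySem.Int.mod (m + 1) 10) 1).filter (fun d => decide (d ∉ u))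
  rw [List.take_append]
  by_cases h0 : (7 : Int) - (u.length : Int) ≤ 0
  · have h7 : 7 - u.length = 0 := by omega
    simp [h0, h7]
  · by_cases hhi : (7 : Int) - (u.length : Int) ≤ (hi.length : Int)
    · have h1 : 7 - u.length - hi.length = 0 := by omega
      have h2 : 7 - u.length = ((7 : Int) - (u.length : Int)).toNat := by omega
      simp [h0, hhi, h1, ← h2]
    · have h1 : hi.length ≤ 7 - u.length := by omega
      have h2 : 7 - u.length - hi.length =
          (((7 : Int) - (u.length : Int)) - (hi.length : Int)).toNat := by omega
      rw [List.take_of_length_le h1, h2]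
      simp [h0, hhi]

-- ===== VERDICT (by name: the statement is the Claim_ definition above) =====
theorem complete_combination_spec : Claim_equal_complete_combination := by
  intro combination _ _
  unfold Spec_complete_combination complete_combination complete_combination_alt
  cases hmax : PySem.List.max?
      (PySem.List.sorted (PySem.Set.ofList combination) (fun x => x) false) (fun x => x) with
  | none => rfl
  | some m =>
    have h := fill_eq (PySem.List.sorted (PySem.Set.ofList combination) (fun x => x) false) m
      (PySem.List.sorted_ofList_pairwise_lt combination)
    rw [extras_eq] at h
    exact h
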